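-- pv_equiv track=rewrite | github.com/anukem/better_developer_resources | interview_questions/python/child_parent.py | two_collections
-- ===== SOURCE A (Python) =====
-- def two_collections(parent_kids):
--
--     hash_of_kids = {}
--     for pair in parent_kids:
--         child = pair[1]
--         parent = pair[0]
--         if child in hash_of_kids:
--             if hash_of_kids[child] == True:
--                 hash_of_kids[child] = None
--             elif hash_of_kids[child] == False:
--                 hash_of_kids[child] = True
--         else:
--             hash_of_kids[child] = True
--
--         if parent not in hash_of_kids:
--             hash_of_kids[parent] = False
--
--     collection1 = []
--     collection2 = []
--
--     for key in hash_of_kids: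
--         value = hash_of_kids[key]
--         if value == True:
--             collection2.append(key)
--         elif value == False:
--             collection1.append(key)
--
--     return (collection1, collection2)
-- ===== SOURCE B (Python) =====
-- def two_collections(parent_kids):
--     children = [pair[1] for pair in parent_kids]
--     flat = [node for pair in parent_kids for node in (pair[1], pair[0])]
--     order = list(dict.fromkeys(flat))
--     collection1 = [node for node in order if children.count(node) == 0]
--     collection2 = [node for node in order if children.count(node) == 1]
--     return (collection1, collection2)
-- ===== Notes on version B (the rewrite author's own statement) =====
-- stated objective: simpler
-- what changed: B removes A's incrementally-maintained node->True/False/None state dict: it flattens the pairs into an appearance list, dedups it once (dict.fromkeys) to get the key order, and classifies each distinct node by counting its occurrences in the children list (count 0 -> collection1, count 1 -> collection2).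
import Mathlib
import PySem

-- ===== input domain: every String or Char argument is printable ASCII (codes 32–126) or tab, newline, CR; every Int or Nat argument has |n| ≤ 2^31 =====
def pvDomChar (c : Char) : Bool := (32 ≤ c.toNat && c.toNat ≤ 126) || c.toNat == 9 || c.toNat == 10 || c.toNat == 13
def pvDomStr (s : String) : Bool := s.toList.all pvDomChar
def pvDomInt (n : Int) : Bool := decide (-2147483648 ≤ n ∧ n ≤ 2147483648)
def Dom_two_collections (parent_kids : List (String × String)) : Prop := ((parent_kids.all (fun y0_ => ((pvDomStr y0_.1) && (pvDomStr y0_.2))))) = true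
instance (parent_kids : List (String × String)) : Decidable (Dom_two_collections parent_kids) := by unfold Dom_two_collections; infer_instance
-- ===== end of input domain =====

-- B drops A's per-node True/False/None state dict: it flattens the pairs, dedups once for key
-- order, and classifies each distinct node by counting it among the children (objective: simpler).


-- ===== PORT A =====
-- loop body of A's first pass (child gets True/None/True tri-state, parent defaults to False)
def pvStepA (h : PySem.Dict String (Option Bool)) (pair : String × String) : PySem.Dict String (Option Bool) :=
  let child := pair.2
  let parent := pair.1
  let h :=
    if h.contains child then
      if h.getD child none = some true then h.insert child none
      else if h.getD child none = some false then h.insert child (some true)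
      else h
    else h.insert child (some true)
  if h.contains parent then h else h.insert parent (some false)

-- loop body of A's second pass
def pvCollectA (acc : List String × List String) (key : String) (value : Option Bool) : List String × List String :=
  if value = some true then (acc.1, acc.2 ++ [key])
  else if value = some false then (acc.1 ++ [key], acc.2)
  else acc

def two_collections (parent_kids : List (String × String)) : List String × List String :=
  let hash_of_kids := parent_kids.foldl pvStepA PySem.Dict.empty
  hash_of_kids.keys.foldl (fun acc key => pvCollectA acc key (hash_of_kids.getD key none)) ([], [])

-- ===== PORT B =====
def two_collections_alt (parent_kids : List (String × String)) : List String × List String :=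
  let children := parent_kids.map (·.2)
  let flat := parent_kids.flatMap (fun pair => [pair.2, pair.1])
  let order := PySem.List.dedup flat
  (order.filter (fun node => PySem.List.count children node == 0),
   order.filter (fun node => PySem.List.count children node == 1))

-- ===== PRECONDITION & SPEC =====
def Spec_two_collections (parent_kids : List (String × String)) (out : List String × List String) : Prop := out = two_collections_alt parent_kids
instance (parent_kids : List (String × String)) (out : List String × List String) : Decidable (Spec_two_collections parent_kids out) := by unfold Spec_two_collections; infer_instance

-- ===== CLAIM (what is proved, stated in full; the proofs are below) =====
def Claim_equal_two_collections : Prop := ∀ (parent_kids : List (String × String)), Dom_two_collections parent_kids → Spec_two_collections parent_kids (two_collections parent_kids)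

-- ===== LEMMAS AND PROOFS =====

-- A's tri-state at a node as a function of how often that node occurred as a child so far
def pvStatus (n : Nat) : Option Bool :=
  if n = 0 then some false else if n = 1 then some true else none

def pvFlat (l : List (String × String)) : List String := l.flatMap (fun pair => [pair.2, pair.1])

theorem pvStatus_succ_of_ge_two {n : Nat} (h : 2 ≤ n) : pvStatus (n + 1) = pvStatus n := by
  unfold pvStatus; split_ifs <;> first | rfl | omega

-- shape of A's dict: items are the first-appearance order, each valued pvStatus (child-count so far)
def pvShape (d : PySem.Dict String (Option Bool)) (O : List String) (cnt : String → Nat) : Prop :=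
  d.items = O.map (fun k => (k, pvStatus (cnt k)))

theorem pvKeys_of_shape {d : PySem.Dict String (Option Bool)} {O : List String} {cnt : String → Nat}
    (h : pvShape d O cnt) : d.keys = O := by
  rw [show d.keys = d.items.map (·.1) from rfl, h, List.map_map]
  exact List.map_id'' (fun _ => rfl) O

theorem pvContains_of_shape {d : PySem.Dict String (Option Bool)} {O : List String} {cnt : String → Nat}
    (h : pvShape d O cnt) (k : String) : d.contains k = decide (k ∈ O) := by
  rw [PySem.Dict.contains_eq_decide_mem_keys, pvKeys_of_shape h]

theorem pvGetD_of_shape {d : PySem.Dict String (Option Bool)} {O : List String} {cnt : String → Nat}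
    (h : pvShape d O cnt) (hnd : O.Nodup) {k : String} (hk : k ∈ O) :
    d.getD k none = pvStatus (cnt k) := by
  apply PySem.Dict.getD_of_mem_items
  · rw [h]; exact List.mem_map_of_mem hk
  · rw [pvKeys_of_shape h]; exact hnd

-- inserting at a key already present rewrites exactly that entry of the shape
theorem pvShape_insert_mem {d : PySem.Dict String (Option Bool)} {O : List String} {cnt : String → Nat}
    (h : pvShape d O cnt) {c : String} (hc : c ∈ O) (v : Option Bool) :
    (d.insert c v).items = O.map (fun k => (k, if k = c then v else pvStatus (cnt k))) := by
  rw [PySem.Dict.items_insert_of_contains d v (by rw [pvContains_of_shape h]; simpa using hc),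
      h, List.map_map]
  apply List.map_congr_left
  intro k hk
  by_cases hkc : k = c
  · subst hkc; simp
  · simp [Function.comp, hkc]

-- the child half of A's loop body preserves the shape, bumping the count at the child
theorem pvChildStep {d : PySem.Dict String (Option Bool)} {O : List String} {cnt : String → Nat}
    (h : pvShape d O cnt) (hnd : O.Nodup) (c : String) (hfresh : c ∉ O → cnt c = 0) :
    pvShape (if d.contains c then
               if d.getD c none = some true then d.insert c none
               else if d.getD c none = some false then d.insert c (some true)
               else d
             else d.insert c (some true))
      (PySem.Set.add O c) (fun k => cnt k + (if k = c then 1 else 0)) := by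
  by_cases hc : c ∈ O
  · rw [pvContains_of_shape h, PySem.Set.add_of_mem hc]
    simp only [hc, decide_true, if_true]
    rw [pvGetD_of_shape h hnd hc]
    unfold pvShape
    by_cases h0 : cnt c = 0
    · rw [if_neg (by simp [pvStatus, h0]), if_pos (by simp [pvStatus, h0]),
          pvShape_insert_mem h hc]
      apply List.map_congr_left; intro k hk
      by_cases hkc : k = c <;> simp [hkc, h0, pvStatus]
    · by_cases h1 : cnt c = 1
      · rw [if_pos (by simp [pvStatus, h1]), pvShape_insert_mem h hc]
        apply List.map_congr_left; intro k hk
        by_cases hkc : k = c <;> simp [hkc, h1, pvStatus]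
      · have h2 : 2 ≤ cnt c := by omega
        rw [if_neg (by simp [pvStatus, h0, h1]), if_neg (by simp [pvStatus, h0, h1]), h]
        apply List.map_congr_left; intro k hk
        by_cases hkc : k = c
        · subst hkc; simp [pvStatus_succ_of_ge_two h2]
        · simp [hkc]
  · rw [pvContains_of_shape h, PySem.Set.add_of_not_mem hc]
    simp only [hc, decide_false, Bool.false_eq_true, if_false]
    unfold pvShape
    rw [PySem.Dict.items_insert_of_not_contains d _ (by rw [pvContains_of_shape h]; simpa using hc),
        h, List.map_append]
    congr 1
    · apply List.map_congr_left; intro k hk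
      have hkc : ¬ k = c := fun he => hc (he ▸ hk)
      simp [hkc]
    · simp [hfresh hc, pvStatus]

-- the parent half of A's loop body preserves the shape (counts unchanged)
theorem pvParentStep {d : PySem.Dict String (Option Bool)} {O : List String} {cnt : String → Nat}
    (h : pvShape d O cnt) (q : String) (hfresh : q ∉ O → cnt q = 0) :
    pvShape (if d.contains q then d else d.insert q (some false)) (PySem.Set.add O q) cnt := by
  by_cases hq : q ∈ O
  · rw [pvContains_of_shape h, PySem.Set.add_of_mem hq]
    simpa [hq] using h
  · rw [pvContains_of_shape h, PySem.Set.add_of_not_mem hq]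
    simp only [hq, decide_false, Bool.false_eq_true, if_false]
    unfold pvShape
    rw [PySem.Dict.items_insert_of_not_contains d _ (by rw [pvContains_of_shape h]; simpa using hq),
        h, List.map_append]
    simp [hfresh hq, pvStatus]

theorem pvCount_concat (cs : List String) (c k : String) :
    (cs ++ [c]).count k = cs.count k + (if k = c then 1 else 0) := by
  rw [List.count_append]
  by_cases hkc : k = c
  · subst hkc; simp
  · simp [hkc, Ne.symm hkc]

theorem pvMemFlat {l : List (String × String)} {x : String} (h : x ∈ l.map (·.2)) : x ∈ pvFlat l := by
  obtain ⟨p, hp, hx⟩ := List.mem_map.mp h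
  exact List.mem_flatMap.mpr ⟨p, hp, by simp [hx.symm]⟩

-- main invariant of A's first pass
theorem pvFirstPass (l : List (String × String)) :
    pvShape (l.foldl pvStepA PySem.Dict.empty) (PySem.List.dedup (pvFlat l))
      (fun k => (l.map (·.2)).count k) := by
  induction l using List.reverseRecOn with
  | nil => rfl
  | append_singleton l p ih =>
    rw [List.foldl_append, List.foldl_cons, List.foldl_nil]
    have hflat : pvFlat (l ++ [p]) = pvFlat l ++ [p.2, p.1] := by
      simp [pvFlat]
    have horder : PySem.List.dedup (pvFlat (l ++ [p]))
        = PySem.Set.add (PySem.Set.add (PySem.List.dedup (pvFlat l)) p.2) p.1 := by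
      rw [hflat]
      simp only [PySem.List.dedup_eq_ofList]
      rw [show pvFlat l ++ [p.2, p.1] = (pvFlat l ++ [p.2]) ++ [p.1] by simp,
          PySem.Set.ofList_append_singleton, PySem.Set.ofList_append_singleton]
    have hnd : (PySem.List.dedup (pvFlat l)).Nodup := PySem.List.nodup_dedup _
    have hfresh : ∀ x, x ∉ PySem.List.dedup (pvFlat l) → ((l.map (·.2)).count x) = 0 := by
      intro x hx
      refine List.count_eq_zero.mpr fun hm => hx ?_
      rw [PySem.List.dedup_eq_ofList]
      exact (PySem.Set.mem_ofList _ _).mpr (pvMemFlat hm)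
    have hchild := pvChildStep ih hnd p.2 (hfresh p.2)
    have hnd2 : (PySem.Set.add (PySem.List.dedup (pvFlat l)) p.2).Nodup :=
      PySem.Set.nodup_add _ p.2 hnd
    have hfresh2 : p.1 ∉ PySem.Set.add (PySem.List.dedup (pvFlat l)) p.2 →
        (fun k => (l.map (·.2)).count k + (if k = p.2 then 1 else 0)) p.1 = 0 := by
      intro hq
      rw [PySem.Set.mem_add] at hq
      have h1 : p.1 ∉ PySem.List.dedup (pvFlat l) := fun hm => hq (Or.inl hm)
      have h2 : p.1 ≠ p.2 := fun hm => hq (Or.inr hm)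
      simp only [if_neg h2]
      simpa using hfresh p.1 h1
    have hparent := pvParentStep hchild p.1 hfresh2
    rw [horder]
    unfold pvShape
    have hcongr : ((PySem.Set.add (PySem.List.dedup (pvFlat l)) p.2).add p.1).map
          (fun k => (k, pvStatus (((l ++ [p]).map (·.2)).count k)))
        = ((PySem.Set.add (PySem.List.dedup (pvFlat l)) p.2).add p.1).map
          (fun k => (k, pvStatus ((l.map (·.2)).count k + (if k = p.2 then 1 else 0)))) := by
      apply List.map_congr_left
      intro k hk
      rw [show (l ++ [p]).map (·.2) = l.map (·.2) ++ [p.2] by simp, pvCount_concat]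
    rw [hcongr]
    exact hparent

-- A's second pass over a shaped dict is B's two filters
theorem pvSecondPass (O : List String) (cnt : String → Nat) (acc : List String × List String) :
    O.foldl (fun acc k => pvCollectA acc k (pvStatus (cnt k))) acc
      = (acc.1 ++ O.filter (fun k => cnt k == 0), acc.2 ++ O.filter (fun k => cnt k == 1)) := by
  induction O generalizing acc with
  | nil => simp
  | cons k O ih =>
    rw [List.foldl_cons, ih]
    by_cases h0 : cnt k = 0
    · simp [pvCollectA, pvStatus, h0]
    · by_cases h1 : cnt k = 1
      · simp [pvCollectA, pvStatus, h1]
      · simp [pvCollectA, pvStatus, h0, h1]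

-- ===== VERDICT (by name: the statement is the Claim_ definition above) =====
theorem two_collections_spec : Claim_equal_two_collections := by
  unfold Claim_equal_two_collections
  intro l _
  unfold Spec_two_collections
  simp only [two_collections, two_collections_alt]
  have hshape := pvFirstPass l
  set d := l.foldl pvStepA PySem.Dict.empty with hd
  set O := PySem.List.dedup (pvFlat l) with hO
  set cnt := fun k => (l.map (·.2)).count k with hcnt
  have hkeys : d.keys = O := pvKeys_of_shape hshape
  have hnd : O.Nodup := PySem.List.nodup_dedup _
  have hget : ∀ k ∈ O, d.getD k none = pvStatus (cnt k) := fun k hk =>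
    pvGetD_of_shape hshape hnd hk
  rw [hkeys,
      PySem.List.foldl_congr_mem O (fun acc key => pvCollectA acc key (d.getD key none))
        (fun acc key => pvCollectA acc key (pvStatus (cnt key))) ([], [])
        (fun acc k hk => by simp only [hget k hk]),
      pvSecondPass O cnt ([], [])]
  simp only [List.nil_append]
  simp [hcnt, hO, PySem.List.dedup_eq_ofList, PySem.List.count_eq, pvFlat]
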